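-- pv_equiv track=rewrite | github.com/memoryoss/memwire | benchmark/utils.py | turns_to_chunks
-- ===== SOURCE A (Python) =====
-- def turns_to_chunks(
--     turns: list[dict],
--     session_date: str = "",
--     chunk_size: int = 5,
--     stride: int = 3,
-- ) -> list[dict[str, str]]:
--     """Convert LOCOMO turns to chunked messages for MemWire.add().
--
--     Creates sliding-window chunks of consecutive turns with:
--       - Session date prefix for temporal grounding
--       - Speaker labels for attribution
--
--     Returns list of {"role": "user", "content": chunk_text}.
--     """
--     if not turns:
--         return []
--
--     date_prefix = f"[Date: {session_date}]\n" if session_date else ""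
--     chunks = []
--
--     for start in range(0, len(turns), stride):
--         window = turns[start : start + chunk_size]
--         if not window:
--             break
--
--         lines = []
--         for turn in window:
--             speaker = turn.get("speaker", "")
--             text = turn.get("text", "").strip()
--             if text:
--                 lines.append(f"{speaker}: {text}")
--
--         if not lines:
--             continue
--
--         chunk_text = date_prefix + "\n".join(lines)
--         chunks.append({"role": "user", "content": chunk_text})
--
--     return chunks
-- ===== SOURCE B (Python) =====
-- def turns_to_chunks(
--     turns: list[dict],
--     session_date: str = "",
--     chunk_size: int = 5,
--     stride: int = 3,
-- ) -> list[dict[str, str]]: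
--     """Sliding-window chunking by consuming the turn list suffix-by-suffix:
--     no start indices, each step takes the window off the front of the remaining
--     suffix and then drops `stride` turns."""
--     if not turns or stride <= 0:
--         return []
--     date_prefix = f"[Date: {session_date}]\n" if session_date else ""
--     chunks = []
--     remaining = turns
--     while remaining:
--         window = remaining[:chunk_size]
--         if not window:
--             break
--         lines = [f"{t.get('speaker', '')}: {s}" for t in window if (s := t.get('text', '').strip())]
--         if lines:
--             chunks.append({"role": "user", "content": date_prefix + "\n".join(lines)})
--         remaining = remaining[stride:]
--     return chunks
-- ===== Notes on version B (the rewrite author's own statement) =====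
-- stated objective: alternative
-- what changed: B has no start indices at all: instead of A's loop over range(0, len, stride) with absolute slices turns[start:start+chunk_size], B repeatedly takes the window off the front of the remaining suffix (remaining[:chunk_size]) and then drops stride turns (remaining = remaining[stride:]), and builds the lines with a filtering comprehension instead of A's explicit append loop.
import Mathlib
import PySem

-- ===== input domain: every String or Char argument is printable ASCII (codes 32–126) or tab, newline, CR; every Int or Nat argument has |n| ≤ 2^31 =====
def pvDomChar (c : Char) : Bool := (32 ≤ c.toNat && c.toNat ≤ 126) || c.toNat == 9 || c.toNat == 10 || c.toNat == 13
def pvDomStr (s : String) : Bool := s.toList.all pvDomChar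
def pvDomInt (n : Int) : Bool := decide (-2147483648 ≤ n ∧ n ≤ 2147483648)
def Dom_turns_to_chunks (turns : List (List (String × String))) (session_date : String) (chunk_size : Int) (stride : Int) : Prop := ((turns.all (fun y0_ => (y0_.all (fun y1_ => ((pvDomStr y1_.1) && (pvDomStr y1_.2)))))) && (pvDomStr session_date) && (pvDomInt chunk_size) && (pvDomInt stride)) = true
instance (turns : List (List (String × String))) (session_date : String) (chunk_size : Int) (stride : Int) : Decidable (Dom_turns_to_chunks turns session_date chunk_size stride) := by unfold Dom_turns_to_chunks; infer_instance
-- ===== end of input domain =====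

-- B walks the turn list suffix-by-suffix (window off the front, then drop `stride`)
-- instead of A's loop over start indices with absolute slices (objective: alternative).

-- ===== PORT A =====
-- dict.get(k, d): first-match lookup in the association list (Python dict keys are unique).
def pyget (turn : List (String × String)) (k d : String) : String :=
  ((turn.find? (fun p => p.1 == k)).map (fun p => p.2)).getD d

-- the 'for start in range(...)' loop of A, with 'break' (empty window) and 'continue' (no lines)
def loopA (turns : List (List (String × String))) (date_prefix : String) (chunk_size : Int) :
    List Int → List (List (String × String)) → List (List (String × String))
  | [], chunks => chunks
  | start :: rest, chunks =>
    let window := PySem.List.slice turns (some start) (some (start + chunk_size))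
    if window = [] then chunks
    else
      let lines := window.foldl
        (fun lines turn =>
          let speaker := pyget turn "speaker" ""
          let text := PySem.Str.strip (pyget turn "text" "")
          if text = "" then lines else lines ++ [speaker ++ ": " ++ text]) []
      if lines = [] then loopA turns date_prefix chunk_size rest chunks
      else loopA turns date_prefix chunk_size rest
        (chunks ++ [[("role", "user"), ("content", date_prefix ++ PySem.Str.join "\n" lines)]])

def turns_to_chunks (turns : List (List (String × String))) (session_date : String) (chunk_size : Int) (stride : Int) : List (List (String × String)) :=
  if turns = [] then []
  else
    let date_prefix := if session_date ≠ "" then "[Date: " ++ session_date ++ "]\n" else ""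
    loopA turns date_prefix chunk_size (PySem.List.pyRange 0 (turns.length : Int) stride) []

-- ===== PORT B =====
-- B's comprehension body: one formatted line per turn with non-empty stripped text
def fmtLine (turn : List (String × String)) : Option String :=
  let s := PySem.Str.strip (pyget turn "text" "")
  if s = "" then none else some (pyget turn "speaker" "" ++ ": " ++ s)

-- Source B's 'while remaining:' loop; `sm1` is stride-1 (the wrapper only calls this for
-- stride ≥ 1, and encoding the positive stride as sm1+1 makes termination structural).
def loopB (chunk_size : Int) (sm1 : Nat) (date_prefix : String) :
    List (List (String × String)) → List (List (String × String)) → List (List (String × String))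
  | [], chunks => chunks
  | t :: rest, chunks =>
    let window := PySem.List.slice (t :: rest) none (some chunk_size)
    if window = [] then chunks
    else
      let lines := window.filterMap fmtLine
      let chunks' := if lines = [] then chunks
        else chunks ++ [[("role", "user"), ("content", date_prefix ++ PySem.Str.join "\n" lines)]]
      loopB chunk_size sm1 date_prefix ((t :: rest).drop (sm1 + 1)) chunks'
  termination_by r => r.length
  decreasing_by simp

def turns_to_chunks_alt (turns : List (List (String × String))) (session_date : String) (chunk_size : Int) (stride : Int) : List (List (String × String)) :=
  if turns = [] ∨ stride ≤ 0 then []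
  else
    let date_prefix := if session_date ≠ "" then "[Date: " ++ session_date ++ "]\n" else ""
    loopB chunk_size (stride.toNat - 1) date_prefix turns []

-- ===== PRECONDITION & SPEC =====
-- Pre_ excludes (a) non-empty turns with stride = 0, where A raises ValueError from range(0, len, 0);
-- (b) non-empty turns with NEGATIVE chunk_size, -chunk_size < len(turns), and stride small enough that
-- either program reaches a window after the first: there A's windows come from Python's negative-
-- slice-end wraparound relative to the WHOLE list while B's are relative to the remaining suffix —
-- an unspecified corner where both values are accidental and neither would be specified.
def Pre_turns_to_chunks (turns : List (List (String × String))) (session_date : String) (chunk_size : Int) (stride : Int) : Prop :=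
  (turns = [] ∨ stride ≠ 0) ∧
  ¬(turns ≠ [] ∧ 0 < stride ∧ chunk_size < 0 ∧ 0 < (turns.length : Int) + chunk_size ∧
      (stride < -chunk_size ∨ stride < (turns.length : Int) + chunk_size))
instance (turns : List (List (String × String))) (session_date : String) (chunk_size : Int) (stride : Int) : Decidable (Pre_turns_to_chunks turns session_date chunk_size stride) := by unfold Pre_turns_to_chunks; infer_instance

def pvWitness_turns_to_chunks : (List (List (String × String))) × String × Int × Int :=
  ([[("speaker", "Ann"), ("text", " hi there ")], [("speaker", "Bob"), ("text", "")]], "2024-01-01", 5, 3)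

def Spec_turns_to_chunks (turns : List (List (String × String))) (session_date : String) (chunk_size : Int) (stride : Int) (out : List (List (String × String))) : Prop := out = turns_to_chunks_alt turns session_date chunk_size stride
instance (turns : List (List (String × String))) (session_date : String) (chunk_size : Int) (stride : Int) (out : List (List (String × String))) : Decidable (Spec_turns_to_chunks turns session_date chunk_size stride out) := by unfold Spec_turns_to_chunks; infer_instance

-- ===== CLAIM =====
def Claim_equal_turns_to_chunks : Prop := ∀ (turns : List (List (String × String))) (session_date : String) (chunk_size : Int) (stride : Int), Dom_turns_to_chunks turns session_date chunk_size stride → Pre_turns_to_chunks turns session_date chunk_size stride → Spec_turns_to_chunks turns session_date chunk_size stride (turns_to_chunks turns session_date chunk_size stride)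


-- ===== LEMMAS AND PROOFS =====

-- unfolding equations for the well-founded loopB
theorem loopB_nil (c : Int) (sm1 : Nat) (dp : String) (chunks : List (List (String × String))) :
    loopB c sm1 dp [] chunks = chunks := by
  rw [loopB]

theorem loopB_cons (c : Int) (sm1 : Nat) (dp : String) (t : List (String × String))
    (rest : List (List (String × String))) (chunks : List (List (String × String))) :
    loopB c sm1 dp (t :: rest) chunks =
      (if PySem.List.slice (t :: rest) none (some c) = [] then chunks
       else
         let lines := (PySem.List.slice (t :: rest) none (some c)).filterMap fmtLine
         loopB c sm1 dp ((t :: rest).drop (sm1 + 1))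
           (if lines = [] then chunks
            else chunks ++ [[("role", "user"), ("content", dp ++ PySem.Str.join "\n" lines)]])) := by
  rw [loopB]

-- range(a, b, s) for positive s: empty when b ≤ a, else a :: range(a+s, b, s)
theorem pyRange_pos_nil (a b s : Int) (hs : 0 < s) (h : b ≤ a) :
    PySem.List.pyRange a b s = [] := by
  rw [PySem.List.pyRange_of_pos a b hs]
  simp [if_neg (by omega : ¬ a < b)]

theorem pyRange_pos_cons (a b s : Int) (hs : 0 < s) (h : a < b) :
    PySem.List.pyRange a b s = a :: PySem.List.pyRange (a + s) b s := by
  rw [PySem.List.pyRange_of_pos a b hs, PySem.List.pyRange_of_pos (a + s) b hs]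
  have hkey : ((b - a + s - 1) / s).toNat
      = (if a + s < b then ((b - (a + s) + s - 1) / s).toNat else 0) + 1 := by
    by_cases h2 : a + s < b
    · have : b - a + s - 1 = (b - (a + s) + s - 1) + 1 * s := by ring
      rw [if_pos h2, this, Int.add_mul_ediv_right _ _ (by omega : s ≠ 0)]
      have hp : 0 ≤ (b - (a + s) + s - 1) / s :=
        Int.ediv_nonneg (by omega) (by omega)
      omega
    · rw [if_neg h2]
      have h1 : 1 ≤ (b - a + s - 1) / s := by
        rw [Int.le_ediv_iff_mul_le hs]; omega
      have h2' : (b - a + s - 1) / s < 2 := by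
        rw [Int.ediv_lt_iff_lt_mul hs]; omega
      omega
  rw [if_pos h, hkey, List.range_succ_eq_map, List.map_cons, List.map_map]
  congr 1
  · push_cast; ring
  · apply List.map_congr_left
    intro k _
    simp only [Function.comp_apply]
    push_cast
    ring

-- A's inner foldl over a window computes acc ++ the filterMap of B's per-turn line
theorem lines_eq (window : List (List (String × String))) (acc : List String) :
    window.foldl
      (fun lines turn =>
        let speaker := pyget turn "speaker" ""
        let text := PySem.Str.strip (pyget turn "text" "")
        if text = "" then lines else lines ++ [speaker ++ ": " ++ text]) acc
    = acc ++ window.filterMap fmtLine := by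
  induction window generalizing acc with
  | nil => simp
  | cons t ts ih =>
    simp only [List.foldl_cons, List.filterMap_cons, fmtLine]
    by_cases h : PySem.Str.strip (pyget t "text" "") = "" <;>
      simp [h, ih, fmtLine, List.append_assoc]

-- the main loop correspondence for chunk_size ≥ 0 and stride ≥ 1:
-- A's loop over the remaining start indices equals B's loop over the corresponding suffix
theorem loop_eq (turns : List (List (String × String))) (dp : String) (c st : Int)
    (hc : 0 ≤ c) (hst : 1 ≤ st) :
    ∀ (k s : Nat) (chunks : List (List (String × String))), turns.length - s ≤ k →
      loopA turns dp c (PySem.List.pyRange (s : Int) (turns.length : Int) st) chunks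
      = loopB c (st.toNat - 1) dp (turns.drop s) chunks := by
  intro k
  induction k with
  | zero =>
    intro s chunks hk
    have hsn : turns.length ≤ s := by omega
    rw [pyRange_pos_nil _ _ _ (by omega) (by exact_mod_cast hsn),
        List.drop_eq_nil_of_le hsn, loopB_nil]
    rfl
  | succ k ih =>
    intro s chunks hk
    by_cases hsn : turns.length ≤ s
    · rw [pyRange_pos_nil _ _ _ (by omega) (by exact_mod_cast hsn),
          List.drop_eq_nil_of_le hsn, loopB_nil]
      rfl
    · have hlt : s < turns.length := by omega
      rw [pyRange_pos_cons _ _ _ (by omega) (by exact_mod_cast hlt)]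
      -- the two windows coincide: turns[s : s+c] = (turns.drop s)[: c]
      have hwin : PySem.List.slice turns (some (s : Int)) (some ((s : Int) + c))
          = PySem.List.slice (turns.drop s) none (some c) := by
        rw [PySem.List.slice_toNat turns (by omega) (by omega),
            PySem.List.slice_to _ hc]
        congr 1
        omega
      obtain ⟨t, rest, hdrop⟩ : ∃ t rest, turns.drop s = t :: rest := by
        cases hd : turns.drop s with
        | nil => exact absurd (List.drop_eq_nil_iff.mp hd) (by omega)
        | cons t rest => exact ⟨t, rest, rfl⟩
      have hstep : (turns.drop s).drop (st.toNat - 1 + 1) = turns.drop (s + st.toNat) := by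
        rw [List.drop_drop]
        congr 1
        omega
      have hcast : (s : Int) + st = ((s + st.toNat : Nat) : Int) := by
        push_cast; omega
      rw [loopA, hwin, hdrop, loopB]
      simp only [← hdrop, hstep, hcast]
      by_cases hw : PySem.List.slice (turns.drop s) none (some c) = []
      · simp [hw]
      · simp only [if_neg hw, lines_eq, List.nil_append]
        by_cases hl : (PySem.List.slice (turns.drop s) none (some c)).filterMap fmtLine = [] <;>
          simp only [hl, reduceIte] <;>
          exact ih (s + st.toNat) _ (by omega)

-- range(a, b, s) for negative s is empty when a ≤ b
theorem pyRange_neg_nil (a b s : Int) (hs : s < 0) (h : a ≤ b) :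
    PySem.List.pyRange a b s = [] := by
  rw [PySem.List.pyRange]
  simp only [if_neg (by omega : ¬ s = 0), if_neg (by omega : ¬ 0 < s),
    if_neg (by omega : ¬ b < a)]
  rfl

-- A stops after the first window when chunk_size < 0 and stride ≥ max(-chunk_size, len+chunk_size);
-- B does too, on the corresponding suffix
theorem agree_neg_chunk (turns : List (List (String × String))) (dp : String) (c st : Int)
    (hne : turns ≠ []) (hc : c < 0) (hst : 1 ≤ st)
    (h1 : -c ≤ st) (h2 : (turns.length : Int) + c ≤ st) :
    loopA turns dp c (PySem.List.pyRange 0 (turns.length : Int) st) []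
    = loopB c (st.toNat - 1) dp turns [] := by
  have hn1 : 1 ≤ turns.length := List.length_pos_iff.mpr hne
  -- the first (and only) window of both is turns[:c] = take (len - (-c).toNat) turns
  set k : Nat := (-c).toNat with hkdef
  have hck : c = -(k : Int) := by omega
  have hwin0 : PySem.List.slice turns none (some c) = turns.take (turns.length - k) := by
    rw [hck]; exact PySem.List.slice_to_neg_natCast turns k (by omega)
  rw [pyRange_pos_cons _ _ _ (by omega) (by exact_mod_cast hn1)]
  obtain ⟨t, rest, hcons⟩ : ∃ t rest, turns = t :: rest := by
    cases turns with
    | nil => exact absurd rfl hne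
    | cons t rest => exact ⟨t, rest, rfl⟩
  rw [loopA]
  conv_rhs => rw [hcons, loopB, ← hcons]
  rw [(by rw [PySem.List.slice_zero_start] : PySem.List.slice turns (some 0) (some (0 + c))
        = PySem.List.slice turns none (some (0 + c))), zero_add]
  by_cases hw : PySem.List.slice turns none (some c) = []
  · simp [hw]
  · simp only [if_neg hw, lines_eq, List.nil_append]
    -- after the first window both loops terminate with the same accumulator
    have hAstop : ∀ chunks, loopA turns dp c (PySem.List.pyRange (0 + st) (turns.length : Int) st) chunks = chunks := by
      intro chunks
      rw [zero_add]
      by_cases hlen : (turns.length : Int) ≤ st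
      · rw [pyRange_pos_nil _ _ _ (by omega) hlen]; rfl
      · rw [pyRange_pos_cons _ _ _ (by omega) (by omega), loopA]
        have : PySem.List.slice turns (some st) (some (st + c)) = [] := by
          rw [PySem.List.slice_toNat turns (by omega) (by omega)]
          have : (st + c).toNat - st.toNat = 0 := by omega
          rw [this, List.take_zero]
        simp [this]
    have hBstop : ∀ chunks, loopB c (st.toNat - 1) dp (turns.drop (st.toNat - 1 + 1)) chunks = chunks := by
      intro chunks
      have hdd : st.toNat - 1 + 1 = st.toNat := by omega
      rw [hdd]
      cases hd : turns.drop st.toNat with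
      | nil => rw [loopB_nil]
      | cons u us =>
        rw [loopB_cons, ← hd]
        have hlend : (turns.drop st.toNat).length = turns.length - st.toNat := by simp
        have : PySem.List.slice (turns.drop st.toNat) none (some c) = [] := by
          rw [hck, PySem.List.slice_to_neg_natCast _ k (by omega)]
          have : (turns.drop st.toNat).length - k = 0 := by omega
          rw [this, List.take_zero]
        rw [this]
        simp
    by_cases hl : (PySem.List.slice turns none (some c)).filterMap fmtLine = [] <;>
      simp only [hl, reduceIte] <;> rw [hAstop, hBstop]

-- ===== VERDICT =====
theorem turns_to_chunks_spec : Claim_equal_turns_to_chunks := by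
  intro turns session_date c st _ hpre
  unfold Spec_turns_to_chunks turns_to_chunks turns_to_chunks_alt
  obtain ⟨hpre1, hpre2⟩ := hpre
  by_cases hturns : turns = []
  · simp [hturns]
  · have hst0 : st ≠ 0 := hpre1.resolve_left hturns
    have hn1 : 1 ≤ turns.length := List.length_pos_iff.mpr hturns
    by_cases hstpos : st ≤ 0
    · -- negative stride: A's range is empty, B's guard returns []
      rw [if_neg hturns, if_pos (Or.inr hstpos),
        pyRange_neg_nil _ _ _ (by omega) (by exact_mod_cast Nat.zero_le _)]
      rfl
    · have hst1 : 1 ≤ st := by omega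
      rw [if_neg hturns, if_neg (show ¬(turns = [] ∨ st ≤ 0) by simp [hturns, hstpos])]
      by_cases hc : 0 ≤ c
      · -- the main correspondence, started at index 0 / the whole list
        have := loop_eq turns
          (if session_date ≠ "" then "[Date: " ++ session_date ++ "]\n" else "")
          c st hc hst1 turns.length 0 [] (by omega)
        simpa using this
      · -- negative chunk_size admitted by Pre_: either the very first window is already
        -- empty (len + c ≤ 0), or both loops stop right after the first window
        replace hc : c < 0 := by omega
        by_cases hlen : (turns.length : Int) + c ≤ 0
        · -- first window empty on both sides: both return []
          set k : Nat := (-c).toNat with hkdef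
          have hck : c = -(k : Int) := by omega
          have htake : turns.take (turns.length - k) = [] := by
            have : turns.length - k = 0 := by omega
            rw [this, List.take_zero]
          rw [pyRange_pos_cons _ _ _ (by omega) (by exact_mod_cast hn1), loopA,
            (by rw [PySem.List.slice_zero_start] : PySem.List.slice turns (some 0) (some (0 + c))
              = PySem.List.slice turns none (some (0 + c))), zero_add, hck,
            PySem.List.slice_to_neg_natCast turns k (by omega), htake]
          obtain ⟨t, rest, hcons⟩ : ∃ t rest, turns = t :: rest := by
            cases turns with
            | nil => exact absurd rfl hturns
            | cons t rest => exact ⟨t, rest, rfl⟩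
          rw [hcons, loopB_cons, ← hcons,
            PySem.List.slice_to_neg_natCast turns k (by omega), htake]
          simp
        · have hnostep : -c ≤ st ∧ (turns.length : Int) + c ≤ st := by
            by_contra hcon
            exact hpre2 ⟨hturns, by omega, hc, by omega, by omega⟩
          exact agree_neg_chunk turns _ c st hturns hc hst1 hnostep.1 hnostep.2
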